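-- pv_equiv track=rewrite | github.com/Murkyshadow/Algorithms_7.0_Yandex | Занятие 3 (Битовые операции, исправляющие коды Хэмминга, сжатие данных)/j. Упаковка и распаковка (LZW).py | pack_str_to_nums
-- ===== SOURCE A (Python) =====
-- def pack_str_to_nums(pack_str):
--     """
--     запакованную строку преобразует в двоичную строку, а затем в десятичные числа
--     :param pack_str: запакованная строка
--     :return: десятичные числа
--     """
--     sym_to_num = {sym : (bin(31-i)[2:]) for i, sym in enumerate('abcdefghijklmnopqrstuvwxyz')}  # тк мы знаем, что в тексте будут только буквы, то присваиваем каждой из 26 букв номер (выделяя не больше 5 бит)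
--     res_bin = ''
--     for num, sym, now_bite in pack_str: # создаем двоичную строку из 'номера пред эл.' + 'добавленного символа'
--         bin_num = bin(num)[2:]
--         bin_num = '0'*(now_bite - len(bin_num)) + bin_num
--         if sym != '':
--             bin_sym = '0'*(5-len(sym_to_num[sym])) + (sym_to_num[sym])
--         else:
--             bin_sym = '00000'   # если нет последнего символа (в конце строки)
--         res_bin += (bin_num + bin_sym)
--
--     if len(res_bin) % 8 != 0:   # округляем кол-во бит до целого кол-ва байт
--         res_bin += '0' * (8 - (len(res_bin) % 8))
--     i = 0
--     output_nums = []
--     while i < len(res_bin): # двоичную строку нарезаем по 8 бит и превращаем в числа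
--         num = int(res_bin[i:i+8], 2)
--         output_nums.append(num)
--         i += 8
--     return output_nums
-- ===== SOURCE B (Python) =====
-- def pack_str_to_nums(pack_str):
--     """Alternative: accumulate all fields into one big integer with a bit count,
--     then slice bytes arithmetically (no string building, no per-chunk parsing)."""
--     acc = 0
--     nbits = 0
--     for num, sym, now_bite in pack_str:
--         w = max(now_bite, num.bit_length(), 1)
--         acc = (acc << w) + num
--         code = 31 - (ord(sym) - 97) if sym else 0
--         acc = (acc << 5) + code
--         nbits += w + 5
--     if nbits % 8:
--         pad = 8 - nbits % 8
--         acc <<= pad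
--         nbits += pad
--     return [(acc >> (nbits - 8 * (k + 1))) & 0xFF for k in range(nbits // 8)]
-- ===== Notes on version B (the rewrite author's own statement) =====
-- stated objective: alternative
-- what changed: B accumulates all bit fields into one big integer with a running bit count and extracts the output bytes arithmetically by shift/mask, instead of building a '0'/'1' character string, zero-padding it and re-parsing it in 8-character slices with int(s,2).
-- outside the precondition, e.g. on pack_str_to_nums([(-1, 'a', 3)]): A returns [63], B returns [255]
import Mathlib
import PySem

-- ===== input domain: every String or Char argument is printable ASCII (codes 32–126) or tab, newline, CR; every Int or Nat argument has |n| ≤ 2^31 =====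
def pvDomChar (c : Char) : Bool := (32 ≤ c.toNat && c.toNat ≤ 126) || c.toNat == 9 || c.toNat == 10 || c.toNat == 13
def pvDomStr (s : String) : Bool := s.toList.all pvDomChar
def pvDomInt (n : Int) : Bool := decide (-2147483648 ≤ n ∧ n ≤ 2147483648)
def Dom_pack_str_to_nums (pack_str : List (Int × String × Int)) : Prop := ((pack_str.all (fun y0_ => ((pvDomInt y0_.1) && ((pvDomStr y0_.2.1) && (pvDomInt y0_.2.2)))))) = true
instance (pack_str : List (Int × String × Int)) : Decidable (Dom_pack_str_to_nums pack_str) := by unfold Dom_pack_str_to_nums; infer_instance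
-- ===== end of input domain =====

-- B replaces A's '0'/'1'-character string (built, padded and re-parsed in 8-char slices)
-- by one big-integer accumulator with a bit count, extracting the bytes arithmetically
-- (objective: alternative decomposition; equivalence of the RETURN value is what is proved).

-- ===== PORT A =====
-- bin(n)[2:] for n > 0, most-significant bit first (fuel-structural so the kernel can
-- evaluate it; fuel = n suffices since the argument halves each step)
def pvBinAux : Nat → Nat → List Char
  | 0, _ => []
  | fuel + 1, n => if n = 0 then [] else pvBinAux fuel (n / 2) ++ [if n % 2 = 1 then '1' else '0']

-- bin(n)[2:] for n ≥ 0
def pvBin (n : Nat) : List Char := if n = 0 then ['0'] else pvBinAux n n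

-- int(s, 2): exact on strings of '0'/'1' characters (the only ones reachable inside Pre_;
-- on other characters Python raises ValueError)
def pvParseBin (s : List Char) : Nat := s.foldl (fun a c => 2 * a + (if c = '1' then 1 else 0)) 0

-- sym_to_num = {sym : bin(31-i)[2:] for i, sym in enumerate('abcdefghijklmnopqrstuvwxyz')}
def pvSymToNum : PySem.Dict String (List Char) :=
  (PySem.List.enumerate "abcdefghijklmnopqrstuvwxyz".toList 0).foldl
    (fun d p => d.insert (String.ofList [p.2]) (pvBin (31 - p.1).toNat)) PySem.Dict.empty

-- the loop body of A: the bit string appended for one tuple (num, sym, now_bite)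
def pvEntryBits (e : Int × String × Int) : List Char :=
  let bin_num := pvBin e.1.toNat                            -- bin(num)[2:]; num ≥ 0 inside Pre_
  let bin_num := List.replicate (e.2.2 - (bin_num.length : Int)).toNat '0' ++ bin_num
  let bin_sym := if e.2.1 ≠ "" then
      let t := (pvSymToNum.get? e.2.1).getD []              -- sym_to_num[sym]; key present inside Pre_
      List.replicate (5 - t.length) '0' ++ t
    else List.replicate 5 '0'
  bin_num ++ bin_sym

-- while i < len(res_bin): parse res_bin[i:i+8]; i += 8   (recursion on the remaining
-- chars; fuel-structural, fuel = length suffices since ≥ 1 char is consumed per step)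
def pvChunksAux : Nat → List Char → List Int
  | 0, _ => []
  | _, [] => []
  | fuel + 1, s => ((pvParseBin (s.take 8) : Nat) : Int) :: pvChunksAux fuel (s.drop 8)

def pvChunks (s : List Char) : List Int := pvChunksAux s.length s

def pack_str_to_nums (pack_str : List (Int × String × Int)) : List Int :=
  let res_bin := pack_str.foldl (fun res e => res ++ pvEntryBits e) []
  let res_bin := if res_bin.length % 8 ≠ 0 then
      res_bin ++ List.replicate (8 - res_bin.length % 8) '0' else res_bin
  pvChunks res_bin

-- ===== PORT B =====
-- num.bit_length() (fuel-structural; fuel = n suffices since the argument halves)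
def pvBitLenAux : Nat → Nat → Nat
  | 0, _ => 0
  | fuel + 1, n => if n = 0 then 0 else pvBitLenAux fuel (n / 2) + 1

def pvBitLen (n : Nat) : Nat := pvBitLenAux n n

-- one iteration of B's loop over (acc, nbits)
def pvStepB (st : Nat × Nat) (e : Int × String × Int) : Nat × Nat :=
  let w : Nat := (max e.2.2 (max (pvBitLen e.1.toNat : Int) 1)).toNat   -- max(now_bite, num.bit_length(), 1)
  let acc := st.1 * 2 ^ w + e.1.toNat                                   -- (acc << w) + num; num ≥ 0 inside Pre_
  let code : Nat := if e.2.1 ≠ "" then 31 - ((e.2.1.toList.headD 'a').toNat - 97) else 0   -- ord(sym) defined inside Pre_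
  (acc * 2 ^ 5 + code, st.2 + w + 5)                                    -- (acc << 5) + code

def pack_str_to_nums_alt (pack_str : List (Int × String × Int)) : List Int :=
  let st := pack_str.foldl pvStepB (0, 0)
  let st := if st.2 % 8 ≠ 0 then (st.1 * 2 ^ (8 - st.2 % 8), st.2 + (8 - st.2 % 8)) else st
  (List.range (st.2 / 8)).map (fun k => (((st.1 / 2 ^ (st.2 - 8 * (k + 1))) % 256 : Nat) : Int))

-- ===== PRECONDITION & SPEC =====
-- Pre_ excludes tuples whose num is negative (bin(num)[2:] leaves '-'/'b' characters in the
-- bit string, so A usually raises ValueError and otherwise accidentally parses a chunk as a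
-- '0b'-prefixed literal) and tuples whose sym is neither '' nor a single lowercase letter
-- (A raises KeyError there).
def Pre_pack_str_to_nums (pack_str : List (Int × String × Int)) : Prop :=
  ∀ e ∈ pack_str, 0 ≤ e.1 ∧ (e.2.1 = "" ∨ e.2.1 ∈ ["a","b","c","d","e","f","g","h","i","j","k","l","m",
    "n","o","p","q","r","s","t","u","v","w","x","y","z"])
instance (pack_str : List (Int × String × Int)) : Decidable (Pre_pack_str_to_nums pack_str) := by
  unfold Pre_pack_str_to_nums; infer_instance

def pvWitness_pack_str_to_nums : (List (Int × String × Int)) := ([(5, "a", 3), (0, "", 9)])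

def Spec_pack_str_to_nums (pack_str : List (Int × String × Int)) (out : List Int) : Prop := out = pack_str_to_nums_alt pack_str
instance (pack_str : List (Int × String × Int)) (out : List Int) : Decidable (Spec_pack_str_to_nums pack_str out) := by unfold Spec_pack_str_to_nums; infer_instance

-- ===== CLAIM (what is proved, stated in full; the proofs are below) =====
def Claim_equal_pack_str_to_nums : Prop := ∀ (pack_str : List (Int × String × Int)), Dom_pack_str_to_nums pack_str → Pre_pack_str_to_nums pack_str → Spec_pack_str_to_nums pack_str (pack_str_to_nums pack_str)

-- ===== LEMMAS AND PROOFS =====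

theorem pvParseBin_foldl (s : List Char) (a : Nat) :
    s.foldl (fun a c => 2 * a + (if c = '1' then 1 else 0)) a = a * 2 ^ s.length + pvParseBin s := by
  induction s generalizing a with
  | nil => simp [pvParseBin]
  | cons c s ih =>
    simp only [List.foldl_cons, List.length_cons]
    rw [ih, show pvParseBin (c :: s) = ((if c = '1' then 1 else 0) : Nat) * 2 ^ s.length + pvParseBin s by
      rw [pvParseBin, List.foldl_cons, ih]; simp [pvParseBin]]
    ring

theorem pvParseBin_append (s t : List Char) :
    pvParseBin (s ++ t) = pvParseBin s * 2 ^ t.length + pvParseBin t := by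
  rw [pvParseBin, List.foldl_append, pvParseBin_foldl]
  rfl

theorem pvParseBin_lt (s : List Char) : pvParseBin s < 2 ^ s.length := by
  induction s with
  | nil => simp [pvParseBin]
  | cons c s ih =>
    have : pvParseBin (c :: s) = (if c = '1' then 1 else 0) * 2 ^ s.length + pvParseBin s := by
      rw [pvParseBin, List.foldl_cons, pvParseBin_foldl]; simp
    rw [this, List.length_cons, pow_succ]
    split <;> omega

theorem pvParseBin_replicate (k : Nat) : pvParseBin (List.replicate k '0') = 0 := by
  induction k with
  | zero => rfl
  | succ n ih =>
    rw [List.replicate_succ, pvParseBin, List.foldl_cons, pvParseBin_foldl]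
    simpa [pvParseBin] using ih

theorem pvBinAux_spec (f : Nat) : ∀ n, n ≤ f →
    pvParseBin (pvBinAux f n) = n ∧ (pvBinAux f n).length = pvBitLenAux f n := by
  induction f with
  | zero =>
    intro n hf
    interval_cases n
    exact ⟨rfl, rfl⟩
  | succ f ih =>
    intro n hf
    rw [pvBinAux, pvBitLenAux]
    by_cases hn : n = 0
    · simp [hn, pvParseBin]
    · simp only [hn, if_false]
      obtain ⟨ihv, ihl⟩ := ih (n / 2) (by omega)
      have hbit : pvParseBin [if n % 2 = 1 then '1' else '0'] = n % 2 := by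
        split <;> simp_all [pvParseBin]
      refine ⟨?_, by simp [ihl]⟩
      rw [pvParseBin_append, hbit, ihv]
      simp only [List.length_cons, List.length_nil]
      omega

theorem pvBin_len (n : Nat) : (pvBin n).length = max (pvBitLen n) 1 := by
  rw [pvBin, pvBitLen]
  split
  · subst ‹n = 0›; simp [pvBitLenAux]
  · rw [(pvBinAux_spec n n le_rfl).2]
    have : 1 ≤ pvBitLenAux n n := by
      cases n with
      | zero => simp_all
      | succ m =>
        have : pvBitLenAux (m + 1) (m + 1) = pvBitLenAux m ((m + 1) / 2) + 1 := by
          rw [pvBitLenAux]; simp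
        omega
    omega

theorem pvBin_val (n : Nat) : pvParseBin (pvBin n) = n := by
  rw [pvBin]; split
  · simp_all [pvParseBin]
  · exact (pvBinAux_spec n n le_rfl).1

-- the 5-bit symbol field of A equals B's code, for every admissible sym
theorem pvSym_spec (s : String) (h : s = "" ∨ s ∈ ["a","b","c","d","e","f","g","h","i","j","k","l","m",
    "n","o","p","q","r","s","t","u","v","w","x","y","z"]) :
    (if s ≠ "" then
        List.replicate (5 - ((pvSymToNum.get? s).getD []).length) '0' ++ (pvSymToNum.get? s).getD []
      else List.replicate 5 '0').length = 5 ∧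
    pvParseBin (if s ≠ "" then
        List.replicate (5 - ((pvSymToNum.get? s).getD []).length) '0' ++ (pvSymToNum.get? s).getD []
      else List.replicate 5 '0')
      = (if s ≠ "" then 31 - ((s.toList.headD 'a').toNat - 97) else 0) ∧
    (if s ≠ "" then 31 - ((s.toList.headD 'a').toNat - 97) else 0) < 32 := by
  rcases h with h | h
  · subst h; exact ⟨by simp, by simpa using pvParseBin_replicate 5, by simp⟩
  · fin_cases h <;> exact ⟨by decide, by decide, by decide⟩

-- A's per-tuple bit string: length = B's field width + 5, value = num * 32 + code
theorem pvEntryBits_spec (e : Int × String × Int) (_h0 : 0 ≤ e.1)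
    (hs : e.2.1 = "" ∨ e.2.1 ∈ ["a","b","c","d","e","f","g","h","i","j","k","l","m",
      "n","o","p","q","r","s","t","u","v","w","x","y","z"]) :
    (pvEntryBits e).length = (max e.2.2 (max (pvBitLen e.1.toNat : Int) 1)).toNat + 5 ∧
    pvParseBin (pvEntryBits e)
      = e.1.toNat * 2 ^ 5 + (if e.2.1 ≠ "" then 31 - ((e.2.1.toList.headD 'a').toNat - 97) else 0) := by
  obtain ⟨hl, hv, _⟩ := pvSym_spec e.2.1 hs
  have hnum_len : (List.replicate (e.2.2 - ((pvBin e.1.toNat).length : Int)).toNat '0' ++ pvBin e.1.toNat).length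
      = (max e.2.2 (max (pvBitLen e.1.toNat : Int) 1)).toNat := by
    have := pvBin_len e.1.toNat
    simp only [List.length_append, List.length_replicate]
    omega
  have hnum_val : pvParseBin (List.replicate (e.2.2 - ((pvBin e.1.toNat).length : Int)).toNat '0' ++ pvBin e.1.toNat)
      = e.1.toNat := by
    rw [pvParseBin_append, pvParseBin_replicate, pvBin_val]; simp
  constructor
  · rw [pvEntryBits]
    simp only [List.length_append]
    simp only [List.length_append] at hnum_len
    omega
  · rw [pvEntryBits, pvParseBin_append, hnum_val, hv, hl]

-- B's loop computes the value and the length of the concatenated bit string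
theorem pvLoopB (l : List (Int × String × Int)) (hp : Pre_pack_str_to_nums l) (a n : Nat) :
    l.foldl pvStepB (a, n)
      = (a * 2 ^ (l.flatMap pvEntryBits).length + pvParseBin (l.flatMap pvEntryBits),
         n + (l.flatMap pvEntryBits).length) := by
  induction l generalizing a n with
  | nil => simp [pvParseBin]
  | cons e l ih =>
    have he := hp e (by simp)
    have hp' : Pre_pack_str_to_nums l := fun x hx => hp x (by simp [hx])
    obtain ⟨hlen, hval⟩ := pvEntryBits_spec e he.1 he.2
    rw [List.foldl_cons, ih hp', List.flatMap_cons, List.length_append,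
      pvParseBin_append, pvStepB, hval, hlen]
    simp only [Prod.mk.injEq]
    exact ⟨by ring, by omega⟩

-- A's byte loop on a string of length divisible by 8 gives B's arithmetic byte extraction
theorem pvDivShift (a b m : Nat) : (a * 2 ^ m + b) / 2 ^ m = a + b / 2 ^ m := by
  rw [Nat.add_comm, Nat.add_mul_div_right _ _ (Nat.two_pow_pos m), Nat.add_comm]

theorem pvChunksAux_eq (f : Nat) : ∀ s : List Char, s.length ≤ f → s.length % 8 = 0 →
    pvChunksAux f s = (List.range (s.length / 8)).map
      (fun k => (((pvParseBin s / 2 ^ (s.length - 8 * (k + 1))) % 256 : Nat) : Int)) := by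
  induction f with
  | zero =>
    intro s hf _
    have : s = [] := List.eq_nil_of_length_eq_zero (by omega)
    subst this; simp [pvChunksAux]
  | succ f ih =>
    intro s hf h8
    match s with
    | [] => simp [pvChunksAux]
    | c :: s' =>
    set s : List Char := c :: s' with hs
    have hpos : 0 < s.length := by simp [hs]
    have hge : 8 ≤ s.length := by omega
    have hdl : (s.drop 8).length = s.length - 8 := by simp
    have htl : (s.take 8).length = 8 := by simp; omega
    have hsplit : pvParseBin s = pvParseBin (s.take 8) * 2 ^ (s.length - 8) + pvParseBin (s.drop 8) := by
      conv_lhs => rw [← List.take_append_drop 8 s]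
      rw [pvParseBin_append, hdl]
    have hT : pvParseBin (s.take 8) < 256 := by
      have := pvParseBin_lt (s.take 8); rw [htl] at this; exact this
    have hD : pvParseBin (s.drop 8) < 2 ^ (s.length - 8) := by
      have := pvParseBin_lt (s.drop 8); rwa [hdl] at this
    rw [show pvChunksAux (f + 1) s = ((pvParseBin (s.take 8) : Nat) : Int) :: pvChunksAux f (s.drop 8) from rfl,
      ih (s.drop 8) (by rw [hdl]; omega) (by rw [hdl]; omega)]
    have hr : s.length / 8 = (s.drop 8).length / 8 + 1 := by rw [hdl]; omega
    rw [hr, List.range_succ_eq_map, List.map_cons, List.map_map]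
    congr 1
    · -- first byte
      have h01 : s.length - 8 * (0 + 1) = s.length - 8 := by omega
      have hdiv : (pvParseBin (s.take 8) * 2 ^ (s.length - 8) + pvParseBin (s.drop 8)) / 2 ^ (s.length - 8)
          = pvParseBin (s.take 8) := by
        rw [pvDivShift, Nat.div_eq_of_lt hD]
        exact Nat.add_zero _
      rw [h01, hsplit, hdiv, Nat.mod_eq_of_lt hT]
    · -- remaining bytes
      refine List.map_congr_left ?_
      intro k hk
      rw [List.mem_range, hdl] at hk
      have hkb : 8 * (k + 1) ≤ s.length - 8 := by omega
      simp only [Function.comp]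
      have harg : s.length - 8 * (k + 1 + 1) = (s.length - 8) - 8 * (k + 1) := by omega
      rw [hdl, harg, hsplit]
      set m := (s.length - 8) - 8 * (k + 1) with hm
      have hTm : pvParseBin (s.take 8) * 2 ^ (s.length - 8)
          = (pvParseBin (s.take 8) * 2 ^ (8 * k) * 256) * 2 ^ m := by
        have he : s.length - 8 = 8 * k + 8 + m := by omega
        have h256 : (256 : Nat) = 2 ^ 8 := by norm_num
        rw [he, h256, pow_add, pow_add]
        ring
      rw [hTm, pvDivShift, Nat.add_comm, Nat.add_mul_mod_self_right]

theorem pvChunks_eq (s : List Char) (h8 : s.length % 8 = 0) :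
    pvChunks s = (List.range (s.length / 8)).map
      (fun k => (((pvParseBin s / 2 ^ (s.length - 8 * (k + 1))) % 256 : Nat) : Int)) :=
  pvChunksAux_eq s.length s le_rfl h8

-- ===== VERDICT (by name: the statement is the Claim_ definition above) =====
theorem pack_str_to_nums_spec : Claim_equal_pack_str_to_nums := by
  intro l _ hp
  unfold Spec_pack_str_to_nums pack_str_to_nums pack_str_to_nums_alt
  have hfold : l.foldl (fun res e => res ++ pvEntryBits e) [] = l.flatMap pvEntryBits := by
    simpa using PySem.List.foldl_append_eq_flatMap pvEntryBits l []
  rw [hfold, pvLoopB l hp 0 0]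
  set bits := l.flatMap pvEntryBits with hbits
  simp only [Nat.zero_mul, Nat.zero_add]
  by_cases hmod : bits.length % 8 = 0
  · simp only [hmod, ne_eq, not_true_eq_false, if_false]
    rw [pvChunks_eq bits hmod]
  · simp only [ne_eq, hmod, not_false_eq_true, if_true]
    have hlen : (bits ++ List.replicate (8 - bits.length % 8) '0').length
        = bits.length + (8 - bits.length % 8) := by simp
    have hval : pvParseBin (bits ++ List.replicate (8 - bits.length % 8) '0')
        = pvParseBin bits * 2 ^ (8 - bits.length % 8) := by
      rw [pvParseBin_append, pvParseBin_replicate]; simp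
    rw [pvChunks_eq _ (by rw [hlen]; omega), hlen, hval]
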